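-- pv_equiv track=rewrite | github.com/MLSpeech/DDKtor | utils.py | merge_close
-- ===== SOURCE A (Python) =====
-- def merge_close(sections_list):
--
--     merge_section = [sections_list[0]]
--     for index in range(1,len(sections_list)):
--         prev_item = merge_section.pop()
--         current_item = sections_list[index]
--         if prev_item[2] == current_item[2]:
--             merge_section.append([prev_item[0], current_item[1], current_item[2], current_item[1]-prev_item[0]])
--         else:
--             merge_section.append(prev_item)
--             merge_section.append(current_item)
--
--     return merge_section
-- ===== SOURCE B (Python) =====
-- def merge_close(sections_list):
--     # Two-phase: split into maximal runs of equal label, then emit each run.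
--     runs = []
--     for item in sections_list:
--         if runs and runs[-1][-1][2] == item[2]:
--             runs[-1].append(item)
--         else:
--             runs.append([item])
--     out = []
--     for g in runs:
--         if len(g) == 1:
--             out.append(g[0])
--         else:
--             out.append([g[0][0], g[-1][1], g[-1][2], g[-1][1] - g[0][0]])
--     return out
-- ===== Notes on version B (the rewrite author's own statement) =====
-- stated objective: alternative
-- what changed: B first splits the list into maximal runs of equal label and then emits each run in a second pass (a singleton run as its original element, a longer run as one merged 4-tuple from the run's first and last rows), instead of A's single pass that pops and re-merges the last accumulator entry at every step.
import Mathlib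
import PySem

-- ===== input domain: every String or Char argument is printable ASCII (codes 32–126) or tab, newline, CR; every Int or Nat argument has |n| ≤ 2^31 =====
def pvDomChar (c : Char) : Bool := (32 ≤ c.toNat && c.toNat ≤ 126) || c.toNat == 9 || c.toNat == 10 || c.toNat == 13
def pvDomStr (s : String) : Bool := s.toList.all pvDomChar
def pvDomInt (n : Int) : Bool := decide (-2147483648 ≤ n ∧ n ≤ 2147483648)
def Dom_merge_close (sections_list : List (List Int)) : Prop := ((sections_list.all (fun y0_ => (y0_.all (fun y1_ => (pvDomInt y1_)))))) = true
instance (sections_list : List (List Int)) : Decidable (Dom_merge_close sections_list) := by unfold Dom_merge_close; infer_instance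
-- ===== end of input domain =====

-- B groups the list into maximal runs of equal label and emits each run in a second pass,
-- instead of A's single pass popping/re-merging the last accumulator entry (objective: alternative decomposition).


-- shared totalized indexing helpers: x[i] with a default (in range under Pre_)
def pvI (r : List Int) (i : Int) : Int := (PySem.List.pyGet? r i).getD 0
def pvRow (g : List (List Int)) (i : Int) : List Int := (PySem.List.pyGet? g i).getD []
def pvRun (rs : List (List (List Int))) (i : Int) : List (List Int) := (PySem.List.pyGet? rs i).getD []

-- ===== PORT A =====
-- one loop body: prev_item = merge_section.pop(); compare labels; push merged tuple or both items
def mergeStepA (ms : List (List Int)) (cur : List Int) : List (List Int) :=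
  let prev := pvRow ms (-1)
  let ms' := ms.dropLast
  if pvI prev 2 == pvI cur 2 then
    ms' ++ [[pvI prev 0, pvI cur 1, pvI cur 2, pvI cur 1 - pvI prev 0]]
  else
    ms' ++ [prev, cur]

def merge_close (sections_list : List (List Int)) : List (List Int) :=
  match sections_list with
  | [] => []  -- Python raises IndexError here (excluded by Pre_)
  | x0 :: rest => rest.foldl mergeStepA [x0]

-- ===== PORT B =====
-- first loop body: extend the last run or start a new one
def runStep (rs : List (List (List Int))) (item : List Int) : List (List (List Int)) :=
  if (!rs.isEmpty) && (pvI (pvRow (pvRun rs (-1)) (-1)) 2 == pvI item 2) then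
    rs.dropLast ++ [pvRun rs (-1) ++ [item]]
  else
    rs ++ [[item]]

-- second loop body: singleton run unchanged, longer run as one merged 4-tuple
def emitRun (g : List (List Int)) : List Int :=
  if g.length == 1 then pvRow g 0
  else [pvI (pvRow g 0) 0, pvI (pvRow g (-1)) 1, pvI (pvRow g (-1)) 2,
        pvI (pvRow g (-1)) 1 - pvI (pvRow g 0) 0]

def merge_close_alt (sections_list : List (List Int)) : List (List Int) :=
  (sections_list.foldl runStep []).map emitRun

-- ===== PRECONDITION & SPEC =====
-- Pre_ excludes exactly the inputs on which Python A raises IndexError: the empty list,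
-- and lists of length ≥ 2 containing a row with fewer than 3 entries.
def Pre_merge_close (sections_list : List (List Int)) : Prop :=
  sections_list ≠ [] ∧ (2 ≤ sections_list.length → ∀ r ∈ sections_list, 3 ≤ r.length)
instance (sections_list : List (List Int)) : Decidable (Pre_merge_close sections_list) := by
  unfold Pre_merge_close; infer_instance

def pvWitness_merge_close : List (List Int) := [[0, 5, 1, 5], [5, 9, 1, 4], [9, 12, 2, 3]]

def Spec_merge_close (sections_list : List (List Int)) (out : List (List Int)) : Prop :=
  out = merge_close_alt sections_list
instance (sections_list : List (List Int)) (out : List (List Int)) : Decidable (Spec_merge_close sections_list out) := by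
  unfold Spec_merge_close; infer_instance

-- ===== CLAIM (what is proved, stated in full; the proofs are below) =====
def Claim_equal_merge_close : Prop := ∀ (sections_list : List (List Int)), Dom_merge_close sections_list → Pre_merge_close sections_list → Spec_merge_close sections_list (merge_close sections_list)

-- ===== LEMMAS AND PROOFS =====

-- the value both programs emit for a (partial) run with first row f, last row l
def emitS (f l : List Int) (single : Bool) : List Int :=
  if single then f else [pvI f 0, pvI l 1, pvI l 2, pvI l 1 - pvI f 0]

-- reference recursion: output for the remaining items, given the current run's summary
def S (f l : List Int) (single : Bool) : List (List Int) → List (List Int)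
  | [] => [emitS f l single]
  | c :: cs => if pvI l 2 = pvI c 2 then S f c false cs
               else emitS f l single :: S c c true cs

lemma pvI_lit2 (a b c d : Int) : pvI [a, b, c, d] 2 = c := rfl

lemma pvI_lit0 (a b c d : Int) : pvI [a, b, c, d] 0 = a := rfl

lemma stepA_loop (cs : List (List Int)) :
    ∀ (acc : List (List Int)) (f l : List Int) (single : Bool), (single = true → l = f) →
      List.foldl mergeStepA (acc ++ [emitS f l single]) cs = acc ++ S f l single cs := by
  induction cs with
  | nil => intro acc f l single _; simp [S]
  | cons c cs ih =>
    intro acc f l single hs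
    have hprev : pvRow (acc ++ [emitS f l single]) (-1) = emitS f l single := by
      simp [pvRow, PySem.List.pyGet?_neg_one_append_singleton]
    have hcond : pvI (emitS f l single) 2 = pvI l 2 := by
      cases single with
      | true => rw [hs rfl]; simp [emitS]
      | false => simp [emitS, pvI_lit2]
    have h0 : pvI (emitS f l single) 0 = pvI f 0 := by
      cases single with
      | true => rw [hs rfl]; simp [emitS]
      | false => simp [emitS, pvI_lit0]
    have hdrop : (acc ++ [emitS f l single]).dropLast = acc := by simp
    simp only [List.foldl_cons, S, mergeStepA, hprev, hcond, h0, hdrop]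
    by_cases h : pvI l 2 = pvI c 2
    · rw [if_pos (by exact beq_iff_eq.mpr h), if_pos h]
      exact ih acc f c false (by simp)
    · rw [if_neg (by simpa using h), if_neg h]
      have : acc ++ [emitS f l single, c] = (acc ++ [emitS f l single]) ++ [emitS c c true] := by
        simp [emitS]
      rw [this, ih (acc ++ [emitS f l single]) c c true (by simp)]
      simp

lemma emitRun_eq (g : List (List Int)) (f l : List Int)
    (hf : g.head? = some f) (hl : g.getLast? = some l) :
    emitRun g = emitS f l (g.length == 1) := by
  have hget0 : pvRow g 0 = f := by
    cases g with
    | nil => simp at hf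
    | cons a t =>
      obtain rfl : a = f := by simpa using hf
      simp [pvRow]
  have hgetl : pvRow g (-1) = l := by
    simp [pvRow, PySem.List.pyGet?_neg_one, hl]
  by_cases h1 : g.length = 1
  · simp [emitRun, emitS, h1, hget0]
  · simp [emitRun, emitS, h1, hget0, hgetl]

lemma stepB_loop (cs : List (List Int)) :
    ∀ (rs : List (List (List Int))) (g : List (List Int)) (f l : List Int),
      g.head? = some f → g.getLast? = some l →
      (List.foldl runStep (rs ++ [g]) cs).map emitRun
        = rs.map emitRun ++ S f l (g.length == 1) cs := by
  induction cs with
  | nil =>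
    intro rs g f l hf hl
    simp [S, emitRun_eq g f l hf hl]
  | cons c cs ih =>
    intro rs g f l hf hl
    have hg : g ≠ [] := by cases g <;> simp_all
    have hrun : pvRun (rs ++ [g]) (-1) = g := by
      simp [pvRun, PySem.List.pyGet?_neg_one_append_singleton]
    have hrow : pvRow g (-1) = l := by
      simp [pvRow, PySem.List.pyGet?_neg_one, hl]
    simp only [List.foldl_cons, S, runStep, hrun, hrow]
    by_cases h : pvI l 2 = pvI c 2
    · rw [if_pos (by simp [h]), if_pos h]
      have hlen : ((g ++ [c]).length == 1) = false := by
        cases g with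
        | nil => exact absurd rfl hg
        | cons a t => simp
      have hhd : (g ++ [c]).head? = some f := by
        cases g with
        | nil => exact absurd rfl hg
        | cons a t => simpa using hf
      have := ih rs (g ++ [c]) f c hhd (by simp)
      rw [List.dropLast_concat, this, hlen]
    · rw [if_neg (by simp [h]), if_neg h]
      rw [show rs ++ [g] ++ [[c]] = (rs ++ [g]) ++ [[c]] from rfl,
          ih (rs ++ [g]) [c] c c rfl rfl]
      simp [emitRun_eq g f l hf hl]

-- ===== VERDICT (by name: the statement is the Claim_ definition above) =====
theorem merge_close_spec : Claim_equal_merge_close := by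
  intro xs _ hpre
  unfold Spec_merge_close
  cases xs with
  | nil => exact absurd rfl hpre.1
  | cons x0 rest =>
    have hA : merge_close (x0 :: rest) = [] ++ S x0 x0 true rest := by
      have := stepA_loop rest [] x0 x0 true (fun _ => rfl)
      simpa [merge_close, emitS] using this
    have hstep0 : runStep [] x0 = [] ++ [[x0]] := by simp [runStep]
    have hB : merge_close_alt (x0 :: rest) = [] ++ S x0 x0 true rest := by
      unfold merge_close_alt
      rw [List.foldl_cons, hstep0, stepB_loop rest [] [x0] x0 x0 rfl rfl]
      simp
    rw [hA, hB]
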